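-- pv_equiv track=rewrite | github.com/shohart/Docker-XRAY-proxy | scripts/compose_xray_config.py | wildcard_to_cidr
-- ===== SOURCE A (Python) =====
-- def wildcard_to_cidr(value: str) -> str:
--     candidate = value.strip()
--     if "*" not in candidate:
--         return candidate
--
--     parts = candidate.split(".")
--     if len(parts) != 4:
--         raise ValueError(f"Invalid wildcard IPv4 mask: {value}")
--
--     fixed = 0
--     octets = []
--     wildcard_seen = False
--     for p in parts:
--         if p == "*":
--             wildcard_seen = True
--             octets.append(0)
--             continue
--         if wildcard_seen:
--             raise ValueError(
--                 f"Wildcard IPv4 mask must use trailing '*' only: {value}"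
--             )
--         octet = int(p)
--         if octet < 0 or octet > 255:
--             raise ValueError(f"Invalid octet in wildcard IPv4 mask: {value}")
--         fixed += 1
--         octets.append(octet)
--
--     prefix = fixed * 8
--     return f"{octets[0]}.{octets[1]}.{octets[2]}.{octets[3]}/{prefix}"
-- ===== SOURCE B (Python) =====
-- def wildcard_to_cidr(value: str) -> str:
--     candidate = value.strip()
--     if "*" not in candidate:
--         return candidate
--
--     parts = candidate.split(".")
--     if len(parts) != 4:
--         raise ValueError(f"Invalid wildcard IPv4 mask: {value}")
--
--     p = parts.index("*") if "*" in parts else 4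
--
--     octets = []
--     for part in parts[:p]:
--         octet = int(part)
--         if octet < 0 or octet > 255:
--             raise ValueError(f"Invalid octet in wildcard IPv4 mask: {value}")
--         octets.append(octet)
--
--     if any(part != "*" for part in parts[p:]):
--         raise ValueError(
--             f"Wildcard IPv4 mask must use trailing '*' only: {value}"
--         )
--     octets += [0] * (4 - p)
--
--     return f"{octets[0]}.{octets[1]}.{octets[2]}.{octets[3]}/{p * 8}"
-- ===== Notes on version B (the rewrite author's own statement) =====
-- stated objective: simpler
-- what changed: Replaces A's single pass with a wildcard_seen flag and incremental fixed counter by a direct decomposition: locate the first '*' part, parse and range-check the prefix octets, verify the suffix is all '*', and compute the prefix length arithmetically from the index.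
import Mathlib
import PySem

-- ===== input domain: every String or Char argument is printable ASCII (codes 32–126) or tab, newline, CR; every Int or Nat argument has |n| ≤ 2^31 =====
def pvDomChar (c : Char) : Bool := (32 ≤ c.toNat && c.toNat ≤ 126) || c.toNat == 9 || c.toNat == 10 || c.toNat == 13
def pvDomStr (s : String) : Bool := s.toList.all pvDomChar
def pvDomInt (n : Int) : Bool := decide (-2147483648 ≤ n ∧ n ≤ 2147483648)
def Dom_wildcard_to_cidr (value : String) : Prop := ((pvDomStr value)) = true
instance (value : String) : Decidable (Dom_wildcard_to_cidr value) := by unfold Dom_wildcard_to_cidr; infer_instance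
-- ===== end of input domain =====

-- B replaces A's one-pass flag loop by the simpler decomposition "find the first '*', parse the
-- prefix, check the suffix is all '*'"; same value wherever A returns (raising inputs are outside Pre_).

-- the f-string `f"{octets[0]}.{octets[1]}.{octets[2]}.{octets[3]}/{prefix}"` (both Pythons end with it)
def pvRender (octets : List Int) (pfx : Int) : String :=
  PySem.Int.toStr (PySem.List.pyGetD octets 0 0) ++ "." ++
  PySem.Int.toStr (PySem.List.pyGetD octets 1 0) ++ "." ++
  PySem.Int.toStr (PySem.List.pyGetD octets 2 0) ++ "." ++
  PySem.Int.toStr (PySem.List.pyGetD octets 3 0) ++ "/" ++ PySem.Int.toStr pfx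

-- ===== PORT A =====
-- A's `for p in parts` loop with state (fixed, octets, wildcard_seen); none = a raise
def pvLoopA : List String → Int → List Int → Bool → Option (Int × List Int)
  | [], fixed, octets, _ => some (fixed, octets)
  | p :: rest, fixed, octets, seen =>
    if p = "*" then pvLoopA rest fixed (octets ++ [0]) true
    else if seen then none
    else
      match PySem.Int.ofStr? p with
      | none => none
      | some octet =>
        if octet < 0 ∨ octet > 255 then none
        else pvLoopA rest (fixed + 1) (octets ++ [octet]) seen

def wildcard_to_cidr (value : String) : String :=
  let candidate := PySem.Str.strip value
  if PySem.Str.isIn "*" candidate = false then candidate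
  else
    let parts := (PySem.Str.split? candidate ".").getD []   -- sep "." ≠ "", always some
    if parts.length ≠ 4 then ""                             -- ValueError: excluded by Pre_
    else
      match pvLoopA parts 0 [] false with
      | none => ""                                          -- ValueError: excluded by Pre_
      | some (fixed, octets) => pvRender octets (fixed * 8)

-- ===== PORT B =====
-- int(part) with the 0..255 range check, over a list; none = a raise
def pvParseOctets : List String → Option (List Int)
  | [] => some []
  | s :: rest =>
    match PySem.Int.ofStr? s with
    | none => none
    | some octet =>
      if octet < 0 ∨ octet > 255 then none
      else (pvParseOctets rest).map (octet :: ·)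

def wildcard_to_cidr_alt (value : String) : String :=
  let candidate := PySem.Str.strip value
  if PySem.Str.isIn "*" candidate = false then candidate
  else
    let parts := (PySem.Str.split? candidate ".").getD []
    if parts.length ≠ 4 then ""                             -- ValueError: excluded by Pre_
    else
      let p : Nat := (PySem.List.index? parts "*").getD 4   -- parts.index("*") if "*" in parts else 4
      match pvParseOctets (parts.take p) with
      | none => ""                                          -- ValueError: excluded by Pre_
      | some octets =>
        if (parts.drop p).any (fun s => s != "*") then ""   -- ValueError: excluded by Pre_
        else pvRender (octets ++ List.replicate (4 - p) 0) ((p : Int) * 8)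

-- ===== PRECONDITION & SPEC =====
def pvOkOctet (s : String) : Bool :=
  match PySem.Int.ofStr? s with
  | none => false
  | some n => decide (0 ≤ n ∧ n ≤ 255)

-- Pre_ = exactly the inputs where A returns: either no '*' in the stripped value, or four
-- dot-separated parts that are valid 0..255 octets followed only by literal "*" parts.
def Pre_wildcard_to_cidr (value : String) : Prop :=
  PySem.Str.isIn "*" (PySem.Str.strip value) = false ∨
    (let parts := (PySem.Str.split? (PySem.Str.strip value) ".").getD []
     parts.length = 4 ∧
     (parts.takeWhile (fun s => s != "*")).all pvOkOctet = true ∧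
     (parts.dropWhile (fun s => s != "*")).all (fun s => s == "*") = true)

instance (value : String) : Decidable (Pre_wildcard_to_cidr value) := by
  unfold Pre_wildcard_to_cidr; infer_instance

def pvWitness_wildcard_to_cidr : String := "10.42.*.*"

def Spec_wildcard_to_cidr (value : String) (out : String) : Prop := out = wildcard_to_cidr_alt value
instance (value : String) (out : String) : Decidable (Spec_wildcard_to_cidr value out) := by
  unfold Spec_wildcard_to_cidr; infer_instance

-- ===== CLAIM (what is proved, stated in full; the proofs are below) =====
def Claim_equal_wildcard_to_cidr : Prop := ∀ (value : String), Dom_wildcard_to_cidr value → Pre_wildcard_to_cidr value → Spec_wildcard_to_cidr value (wildcard_to_cidr value)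

-- ===== LEMMAS AND PROOFS =====

-- A's loop on an all-"*" tail just appends zeros
lemma pvLoopA_stars (stars : List String) (h : stars.all (fun s => s == "*") = true) :
    ∀ (fixed : Int) (octets : List Int) (seen : Bool),
    pvLoopA stars fixed octets seen = some (fixed, octets ++ List.replicate stars.length 0) := by
  induction stars with
  | nil => intro fixed octets seen; simp [pvLoopA]
  | cons s rest ih =>
    intro fixed octets seen
    simp only [List.all_cons, Bool.and_eq_true, beq_iff_eq] at h
    obtain ⟨hs, hrest⟩ := h
    simp only [pvLoopA, hs, ih hrest]
    simp [List.replicate_succ, List.append_assoc]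

lemma pvParseOctets_isSome (pre : List String) (h : pre.all pvOkOctet = true) :
    (pvParseOctets pre).isSome = true := by
  induction pre with
  | nil => simp [pvParseOctets]
  | cons s rest ih =>
    simp only [List.all_cons, Bool.and_eq_true] at h
    obtain ⟨hs, hrest⟩ := h
    unfold pvOkOctet at hs
    unfold pvParseOctets
    cases hof : PySem.Int.ofStr? s with
    | none => rw [hof] at hs; simp at hs
    | some n =>
      rw [hof] at hs
      simp only [decide_eq_true_eq] at hs
      have : ¬ (n < 0 ∨ n > 255) := by omega
      simp only [this, if_false]
      have := ih hrest
      cases hrec : pvParseOctets rest with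
      | none => rw [hrec] at this; simp at this
      | some os => simp

-- a valid octet string is never "*"
lemma pvOkOctet_ne_star (s : String) (h : pvOkOctet s = true) : s ≠ "*" := by
  intro hs
  subst hs
  simp [pvOkOctet, show PySem.Int.ofStr? "*" = none from by decide] at h

-- A's loop on (valid octets ++ all-stars) = the parsed octets padded with zeros
lemma pvLoopA_main (pre stars : List String)
    (hpre : pre.all pvOkOctet = true) (hstars : stars.all (fun s => s == "*") = true) :
    ∀ (fixed : Int) (octets : List Int),
    pvLoopA (pre ++ stars) fixed octets false =
      some (fixed + pre.length,
            octets ++ (pvParseOctets pre).getD [] ++ List.replicate stars.length 0) := by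
  induction pre with
  | nil =>
    intro fixed octets
    simp only [List.nil_append, pvLoopA_stars stars hstars, pvParseOctets]
    simp
  | cons s rest ih =>
    intro fixed octets
    simp only [List.all_cons, Bool.and_eq_true] at hpre
    obtain ⟨hs, hrest⟩ := hpre
    have hne : s ≠ "*" := pvOkOctet_ne_star s hs
    unfold pvOkOctet at hs
    cases hof : PySem.Int.ofStr? s with
    | none => rw [hof] at hs; simp at hs
    | some n =>
      rw [hof] at hs
      simp only [decide_eq_true_eq] at hs
      have hnb : ¬ (n < 0 ∨ n > 255) := by omega
      simp only [List.cons_append, pvLoopA, hne, if_false, Bool.false_eq_true, hof, hnb,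
        ih hrest]
      have hsome := pvParseOctets_isSome rest hrest
      cases hrec : pvParseOctets rest with
      | none => rw [hrec] at hsome; simp at hsome
      | some os =>
        unfold pvParseOctets
        rw [hof]
        simp only [hnb, if_false, hrec, Option.map_some, Option.getD_some,
          Option.some.injEq, Prod.mk.injEq, List.length_cons]
        refine ⟨by push_cast; ring, by simp [List.append_assoc]⟩

-- index? on (no-star prefix ++ stars)
lemma pvIndex_pre_append (pre stars : List String) (hpre : ∀ s ∈ pre, s ≠ "*") :
    PySem.List.index? (pre ++ stars) "*" =
      (PySem.List.index? stars "*").map (fun i => pre.length + i) := by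
  induction pre with
  | nil => simp [PySem.List.index?]
  | cons s rest ih =>
    have hs : (s == "*") = false := by simpa using hpre s (by simp)
    have ih' := ih (fun t ht => hpre t (by simp [ht]))
    simp only [PySem.List.index?] at ih' ⊢
    rw [List.cons_append, List.idxOf?_cons, hs]
    simp only [Bool.false_eq_true, if_false, ih', Option.map_map]
    cases List.idxOf? "*" stars
    · simp
    · simp only [Option.map_some, Function.comp]
      congr 1
      simp
      omega

-- ===== VERDICT (by name: the statement is the Claim_ definition above) =====
theorem wildcard_to_cidr_spec : Claim_equal_wildcard_to_cidr := by
  intro value _hdom hpre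
  unfold Spec_wildcard_to_cidr
  simp only [wildcard_to_cidr, wildcard_to_cidr_alt]
  by_cases hin : PySem.Str.isIn "*" (PySem.Str.strip value) = false
  · rw [if_pos hin, if_pos hin]
  · rcases hpre with hpre | hpre
    · exact absurd hpre hin
    rw [if_neg hin, if_neg hin]
    set parts := (PySem.Str.split? (PySem.Str.strip value) ".").getD [] with hp
    obtain ⟨hlen, hok, hstars⟩ := hpre
    set pre := parts.takeWhile (fun s => s != "*") with hpredef
    set stars := parts.dropWhile (fun s => s != "*") with hstarsdef
    have hsplit : pre ++ stars = parts := List.takeWhile_append_dropWhile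
    have hprene : ∀ s ∈ pre, s ≠ "*" := by
      intro s hsmem
      have := List.mem_takeWhile_imp (hpredef ▸ hsmem)
      simpa using this
    rw [if_neg (by simp [hlen]), if_neg (by simp [hlen])]
    -- the index p equals pre.length
    have hplen : pre.length + stars.length = 4 := by
      rw [← hlen, ← hsplit, List.length_append]
    have hpval : (PySem.List.index? parts "*").getD 4 = pre.length := by
      rw [← hsplit, pvIndex_pre_append pre stars hprene]
      cases hst : stars with
      | nil =>
        rw [hst, List.length_nil] at hplen
        simp [PySem.List.index?]
        omega
      | cons t rest =>
        have ht : t = "*" := by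
          have h2 := hstars
          rw [hst] at h2
          simp only [List.all_cons, Bool.and_eq_true, beq_iff_eq] at h2
          exact h2.1
        simp [PySem.List.index?, List.idxOf?_cons, ht]
    rw [hpval]
    have htake : parts.take pre.length = pre := by rw [← hsplit]; exact List.take_left
    have hdrop : parts.drop pre.length = stars := by rw [← hsplit]; exact List.drop_left
    rw [htake, hdrop]
    have hnoany : (stars.any (fun s => s != "*")) = false := by
      simp only [List.all_eq_true, beq_iff_eq] at hstars
      simp only [List.any_eq_false, bne_iff_ne, ne_eq, not_not]
      exact hstars
    have hsome := pvParseOctets_isSome pre hok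
    cases hparse : pvParseOctets pre with
    | none => rw [hparse] at hsome; simp at hsome
    | some os =>
      have h4 : (4 : Nat) - pre.length = stars.length := by omega
      rw [← hsplit, pvLoopA_main pre stars hok hstars 0 []]
      simp only [hparse, Option.getD_some, List.nil_append, hnoany, Bool.false_eq_true,
        if_false, zero_add, h4]
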